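-- pv_equiv track=rewrite | github.com/echocircuit/trip-a-day | main.py | _build_night_variants
-- ===== SOURCE A (Python) =====
-- def _build_night_variants(target: int, flex: int) -> list[int]:
--     """Return unique night counts [target-flex … target+flex], all >= 1."""
--     seen: set[int] = set()
--     result: list[int] = []
--     for delta in range(-flex, flex + 1):
--         n = max(1, target + delta)
--         if n not in seen:
--             seen.add(n)
--             result.append(n)
--     return result
-- ===== SOURCE B (Python) =====
-- def _build_night_variants(target: int, flex: int) -> list[int]:
--     """Return unique night counts [target-flex ... target+flex], all >= 1."""
--     if flex < 0:
--         return []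
--     lower = max(1, target - flex)
--     upper = max(1, target + flex)
--     return list(range(lower, upper + 1))
-- ===== Notes on version B (the rewrite author's own statement) =====
-- stated objective: simpler
-- what changed: Replaces the dedup loop over range(-flex, flex+1) with a closed-form contiguous range from max(1, target-flex) to max(1, target+flex), since the clamped values form exactly that run.
import Mathlib
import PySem

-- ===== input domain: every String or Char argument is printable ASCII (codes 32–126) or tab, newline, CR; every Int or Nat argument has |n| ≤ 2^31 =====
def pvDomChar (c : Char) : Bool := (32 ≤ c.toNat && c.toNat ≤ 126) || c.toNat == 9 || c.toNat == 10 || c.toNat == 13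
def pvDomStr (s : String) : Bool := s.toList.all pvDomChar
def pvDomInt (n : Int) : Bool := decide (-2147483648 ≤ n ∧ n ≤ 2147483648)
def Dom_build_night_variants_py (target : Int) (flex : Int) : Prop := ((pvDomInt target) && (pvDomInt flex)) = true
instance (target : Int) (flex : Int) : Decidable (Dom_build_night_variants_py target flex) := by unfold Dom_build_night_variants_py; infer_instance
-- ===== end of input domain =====

-- B replaces A's dedup loop by the closed-form contiguous range; objective: simpler.

-- ===== PORT A =====
-- the loop body of A (seen set, result list; append n when unseen)
def bnvStep (target : Int) (st : PySem.Set Int × List Int) (delta : Int) :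
    PySem.Set Int × List Int :=
  let n := max 1 (target + delta)
  if PySem.Set.contains st.1 n then st else (PySem.Set.add st.1 n, st.2 ++ [n])

def build_night_variants_py (target : Int) (flex : Int) : List Int :=
  ((PySem.List.pyRange (-flex) (flex + 1) 1).foldl (bnvStep target)
    (PySem.Set.empty, ([] : List Int))).2

-- ===== PORT B =====
def build_night_variants_py_alt (target : Int) (flex : Int) : List Int :=
  if flex < 0 then []
  else PySem.List.pyRange (max 1 (target - flex)) (max 1 (target + flex) + 1) 1

-- ===== PRECONDITION & SPEC =====
def Spec_build_night_variants_py (target : Int) (flex : Int) (out : List Int) : Prop := out = build_night_variants_py_alt target flex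
instance (target : Int) (flex : Int) (out : List Int) : Decidable (Spec_build_night_variants_py target flex out) := by unfold Spec_build_night_variants_py; infer_instance

-- ===== CLAIM (what is proved, stated in full; the proofs are below) =====
def Claim_equal_build_night_variants_py : Prop := ∀ (target : Int) (flex : Int), Dom_build_night_variants_py target flex → Spec_build_night_variants_py target flex (build_night_variants_py target flex)

-- ===== LEMMAS AND PROOFS =====

-- Invariant: after processing the deltas a, a+1, …, a+k, the seen set and the result list
-- are both the contiguous range [max 1 (target+a), max 1 (target+a+k)].
theorem bnv_inv (target a : Int) (k : Nat) :
    (PySem.List.pyRange a (a + k + 1) 1).foldl (bnvStep target)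
        (PySem.Set.empty, ([] : List Int))
      = (PySem.List.pyRange (max 1 (target + a)) (max 1 (target + a + k) + 1) 1,
         PySem.List.pyRange (max 1 (target + a)) (max 1 (target + a + k) + 1) 1) := by
  induction k with
  | zero =>
      push_cast
      rw [show a + 0 + 1 = a + 1 from by ring, PySem.List.pyRange_one_singleton]
      simp [List.foldl, bnvStep, PySem.Set.contains, PySem.Set.empty, PySem.Set.add,
        PySem.List.pyRange_one_singleton]
  | succ k ih =>
      have hsplit : PySem.List.pyRange a (a + (k + 1 : Nat) + 1) 1
          = PySem.List.pyRange a (a + k + 1) 1 ++ [a + k + 1] := by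
        have : (a + (k + 1 : Nat) + 1) = (a + k + 1) + 1 := by push_cast; ring
        rw [this, PySem.List.pyRange_one_succ_right (by omega)]
      rw [hsplit, List.foldl_append, ih]
      simp only [List.foldl, bnvStep, PySem.Set.contains]
      push_cast
      rw [show target + (a + (k : Int) + 1) = target + a + (k : Int) + 1 from by ring,
          show target + a + ((k : Int) + 1) = target + a + (k : Int) + 1 from by ring]
      set lo := max 1 (target + a) with hlo
      set hi := max 1 (target + a + (k : Int)) with hhi
      set n := max 1 (target + a + (k : Int) + 1) with hnn
      have hmem : (PySem.List.pyRange lo (hi + 1) 1).contains n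
          = decide (lo ≤ n ∧ n < hi + 1) := by
        simp [PySem.List.mem_pyRange_one]
      have hcase : n = hi ∨ n = hi + 1 := by omega
      rcases hcase with hc | hc
      · -- n already present: state unchanged
        rw [hmem, decide_eq_true_eq.mpr ⟨by omega, by omega⟩, if_pos rfl, hc]
      · -- n is new: both sides append n
        rw [hmem, decide_eq_false (by omega : ¬ (lo ≤ n ∧ n < hi + 1))]
        rw [if_neg (by simp)]
        have happ : PySem.List.pyRange lo (n + 1) 1
            = PySem.List.pyRange lo (hi + 1) 1 ++ [hi + 1] := by
          rw [hc]
          exact PySem.List.pyRange_one_succ_right (by omega)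
        rw [happ, ← hc]
        simp [PySem.Set.add]

-- ===== VERDICT (by name: the statement is the Claim_ definition above) =====
theorem build_night_variants_py_spec : Claim_equal_build_night_variants_py := by
  intro target flex _
  unfold Spec_build_night_variants_py build_night_variants_py build_night_variants_py_alt
  by_cases hf : flex < 0
  · rw [if_pos hf, PySem.List.pyRange_one_eq_nil (by omega)]
    simp [PySem.Set.empty]
  · rw [if_neg hf]
    rw [Int.not_lt] at hf
    have hk : flex + 1 = (-flex) + ((2 * flex).toNat : Nat) + 1 := by omega
    rw [hk, bnv_inv target (-flex) (2 * flex).toNat]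
    have h1 : target + (-flex) = target - flex := by ring
    have h2 : target + (-flex) + ((2 * flex).toNat : Nat) = target + flex := by omega
    rw [h2, h1]
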